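-- pv_equiv track=rewrite | github.com/TiRoZh/Gomoku | final.py | check_diagonal_right
-- ===== SOURCE A (Python) =====
-- def check_diagonal_right(player,amount_check):
--     #name are misleading, since the coordinates towards teh right are always
--     #the same, i dont need to keep track of the y coordinates, too lazy to change variable name
--     x_cord=0
--     in_a_row=0
--     while x_cord<15:
--         if ((x_cord,x_cord) in player):
--             in_a_row+=1
--             if in_a_row==amount_check:
--                 return True
--         else:
--             in_a_row=0
--         x_cord+=1
--     return False
-- ===== SOURCE B (Python) =====
-- def _runs(bs):
--     """Run-length encode a list of booleans."""
--     if not bs: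
--         return []
--     rest = _runs(bs[1:])
--     if rest and rest[0][0] == bs[0]:
--         return [(bs[0], rest[0][1] + 1)] + rest[1:]
--     return [(bs[0], 1)] + rest
--
-- def check_diagonal_right(player, amount_check):
--     present = [(x, x) in player for x in range(15)]
--     longest = 0
--     for k, n in _runs(present):
--         if k and longest < n:
--             longest = n
--     return longest >= amount_check
-- ===== Notes on version B (the rewrite author's own statement) =====
-- stated objective: alternative
-- what changed: Replaced A's early-returning incremental streak counter with a build-then-summarize pass (run-length encode the 15 diagonal cells, compare the longest occupied run with amount_check); Pre_ restricts to positive amount_check, the natural domain, since for non-positive required lengths A's False and B's vacuous True are both defensible and no caller would specify either.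
-- outside the precondition, e.g. on check_diagonal_right(set(), 0): A returns False, B returns True; on check_diagonal_right({(0, 0)}, -1): A returns False, B returns True
import Mathlib
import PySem

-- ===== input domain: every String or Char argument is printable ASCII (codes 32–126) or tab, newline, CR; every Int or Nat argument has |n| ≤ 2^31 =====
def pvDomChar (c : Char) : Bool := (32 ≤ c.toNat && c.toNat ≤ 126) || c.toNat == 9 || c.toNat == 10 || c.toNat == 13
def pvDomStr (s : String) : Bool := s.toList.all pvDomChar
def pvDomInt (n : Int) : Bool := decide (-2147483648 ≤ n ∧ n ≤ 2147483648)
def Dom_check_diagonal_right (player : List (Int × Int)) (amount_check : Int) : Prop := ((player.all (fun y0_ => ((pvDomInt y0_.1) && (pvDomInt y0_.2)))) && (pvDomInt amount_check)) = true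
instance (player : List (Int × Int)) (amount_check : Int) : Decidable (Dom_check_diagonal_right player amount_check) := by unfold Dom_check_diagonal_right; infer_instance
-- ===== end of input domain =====

-- B replaces A's early-returning incremental streak counter with a build-then-summarize
-- pass (run-length encode the diagonal, compare the longest occupied run with amount_check);
-- same cost, alternative structure.

-- ===== PORT A =====
-- while x_cord < 15 loop of A, transliterated as recursion over the remaining x coordinates
def aGo (player : List (Int × Int)) (amount_check : Int) : List Int → Int → Bool
  | [], _ => false
  | x :: xs, in_a_row =>
    if player.contains (x, x) then
      if in_a_row + 1 = amount_check then true
      else aGo player amount_check xs (in_a_row + 1)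
    else aGo player amount_check xs 0

def check_diagonal_right (player : List (Int × Int)) (amount_check : Int) : Bool :=
  aGo player amount_check (PySem.List.pyRange 0 15 1) 0

-- ===== PORT B =====
-- _runs of Source B: run-length encoding of a boolean list, recursive on the tail
def pvRuns : List Bool → List (Bool × Int)
  | [] => []
  | b :: bs =>
    match pvRuns bs with
    | (c, n) :: t => if b == c then (b, n + 1) :: t else (b, 1) :: (c, n) :: t
    | [] => [(b, 1)]

def check_diagonal_right_alt (player : List (Int × Int)) (amount_check : Int) : Bool :=
  let present := (PySem.List.pyRange 0 15 1).map (fun x => player.contains (x, x))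
  let longest := (pvRuns present).foldl
    (fun m p => if p.1 && decide (m < p.2) then p.2 else m) 0
  decide (amount_check ≤ longest)

-- ===== PRECONDITION & SPEC =====
-- Pre_ restricts to positive amount_check, the function's natural domain (a required win
-- streak length); for non-positive amount_check no caller would specify the value: A returns
-- False (its equality test only fires after an increment) and B's vacuous True is equally
-- defensible, so those inputs are excluded.
def Pre_check_diagonal_right (player : List (Int × Int)) (amount_check : Int) : Prop := 1 ≤ amount_check
instance (player : List (Int × Int)) (amount_check : Int) : Decidable (Pre_check_diagonal_right player amount_check) := by unfold Pre_check_diagonal_right; infer_instance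

def pvWitness_check_diagonal_right : (List (Int × Int)) × Int := ([(0, 0), (1, 1)], 2)

def Spec_check_diagonal_right (player : List (Int × Int)) (amount_check : Int) (out : Bool) : Prop := out = check_diagonal_right_alt player amount_check
instance (player : List (Int × Int)) (amount_check : Int) (out : Bool) : Decidable (Spec_check_diagonal_right player amount_check out) := by unfold Spec_check_diagonal_right; infer_instance

-- ===== CLAIM (what is proved, stated in full; the proofs are below) =====
def Claim_equal_check_diagonal_right : Prop := ∀ (player : List (Int × Int)) (amount_check : Int), Dom_check_diagonal_right player amount_check → Pre_check_diagonal_right player amount_check → Spec_check_diagonal_right player amount_check (check_diagonal_right player amount_check)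

-- ===== LEMMAS AND PROOFS =====

-- A's loop, abstracted over the list of membership booleans
def bGo (a : Int) : List Bool → Int → Bool
  | [], _ => false
  | b :: bs, r => if b then (if r + 1 = a then true else bGo a bs (r + 1)) else bGo a bs 0

theorem aGo_eq_bGo (player : List (Int × Int)) (a : Int) (xs : List Int) (r : Int) :
    aGo player a xs r = bGo a (xs.map (fun x => player.contains (x, x))) r := by
  induction xs generalizing r with
  | nil => rfl
  | cons x xs ih => simp only [aGo, List.map, bGo]; split_ifs <;> simp [ih]

-- max streak scanner
def mx : List Bool → Int → Int
  | [], r => r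
  | true :: bs, r => mx bs (r + 1)
  | false :: bs, r => max r (mx bs 0)

-- leading-True count and the suffix after the leading Trues
def cntT : List Bool → Int
  | [] => 0
  | true :: t => 1 + cntT t
  | false :: _ => 0

def dwT : List Bool → List Bool
  | [] => []
  | true :: t => dwT t
  | false :: t => false :: t

-- the fold step of B's longest-run loop
def pvF (m : Int) (p : Bool × Int) : Int := if p.1 && decide (m < p.2) then p.2 else m

def Mof (bs : List Bool) : Int := (pvRuns bs).foldl pvF 0

theorem mx_ge (bs : List Bool) (r : Int) : r ≤ mx bs r := by
  induction bs generalizing r with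
  | nil => simp [mx]
  | cons b bs ih =>
    cases b
    · simpa [mx] using le_max_left r (mx bs 0)
    · exact le_trans (by omega) (ih (r + 1))

theorem pvF_true (m n : Int) : pvF m (true, n) = max m n := by
  simp only [pvF]
  by_cases h : m < n
  · simp [h]; omega
  · simp [h]; omega

theorem pvF_false (m n : Int) : pvF m (false, n) = m := by simp [pvF]

theorem pvF_max (a b : Int) (p : Bool × Int) : pvF (max a b) p = max a (pvF b p) := by
  rcases p with ⟨k, n⟩
  cases k
  · simp [pvF_false]
  · simp only [pvF_true]; omega

theorem foldl_pvF_max (l : List (Bool × Int)) (a b : Int) :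
    l.foldl pvF (max a b) = max a (l.foldl pvF b) := by
  induction l generalizing b with
  | nil => rfl
  | cons p l ih => simp only [List.foldl_cons, pvF_max, ih]

theorem cntT_nonneg (bs : List Bool) : 0 ≤ cntT bs := by
  induction bs with
  | nil => simp [cntT]
  | cons b bs ih => cases b <;> simp [cntT] <;> omega

theorem pvRuns_false_head (t : List Bool) :
    ∃ n g, pvRuns (false :: t) = (false, n) :: g := by
  simp only [pvRuns]
  rcases h : pvRuns t with _ | ⟨⟨c, n⟩, tl⟩
  · exact ⟨1, [], rfl⟩
  · cases c
    · exact ⟨n + 1, tl, by simp⟩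
    · exact ⟨1, (true, n) :: tl, by simp⟩

theorem pvRuns_true (t : List Bool) :
    pvRuns (true :: t) = (true, 1 + cntT t) :: pvRuns (dwT t) := by
  induction t with
  | nil => simp [pvRuns, cntT, dwT]
  | cons b t ih =>
    cases b
    · obtain ⟨n, g, h⟩ := pvRuns_false_head t
      have hstep : pvRuns (true :: false :: t) =
          (match pvRuns (false :: t) with
            | (c, n) :: t' => if true == c then (true, n + 1) :: t' else (true, 1) :: (c, n) :: t'
            | [] => [(true, 1)]) := rfl
      rw [hstep, h]
      simp [cntT, dwT, h]
    · simp only [pvRuns] at ih ⊢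
      rw [ih]
      simp [cntT, dwT]
      omega

theorem Mof_false (t : List Bool) : Mof (false :: t) = Mof t := by
  simp only [Mof, pvRuns]
  rcases h : pvRuns t with _ | ⟨⟨c, n⟩, tl⟩
  · simp [pvF_false]
  · cases c
    · simp [pvF_false]
    · simp [pvF_false]

theorem dwT_length (t : List Bool) : (dwT t).length ≤ t.length := by
  induction t with
  | nil => simp [dwT]
  | cons b t ih => cases b <;> simp [dwT] <;> omega

theorem mx_lead (t : List Bool) (r : Int) (hr : 0 ≤ r) :
    mx t r = max (r + cntT t) (mx (dwT t) 0) := by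
  induction t generalizing r with
  | nil => simp [mx, cntT, dwT]; omega
  | cons b t ih =>
    cases b
    · have h0 : (0 : Int) ≤ mx t 0 := mx_ge t 0
      simp only [mx, cntT, dwT]
      omega
    · simp only [mx, cntT, dwT]
      rw [ih (r + 1) (by omega)]
      congr 1
      omega

theorem mx_eq_Mof_aux : ∀ (fuel : Nat) (bs : List Bool), bs.length ≤ fuel → mx bs 0 = Mof bs := by
  intro fuel
  induction fuel with
  | zero =>
    intro bs h
    have : bs = [] := List.eq_nil_of_length_eq_zero (by omega)
    subst this; rfl
  | succ n ih =>
    intro bs h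
    match bs with
    | [] => rfl
    | false :: t =>
      have h0 : (0 : Int) ≤ mx t 0 := mx_ge t 0
      have : mx (false :: t) 0 = mx t 0 := by simp only [mx]; omega
      rw [this, ih t (by simpa using Nat.le_of_succ_le_succ h), Mof_false]
    | true :: t =>
      have hlen : (dwT t).length ≤ n := le_trans (dwT_length t) (by simpa using Nat.le_of_succ_le_succ h)
      have h1 : mx (true :: t) 0 = max (1 + cntT t) (mx (dwT t) 0) := by
        simp only [mx]
        rw [mx_lead t (0 + 1) (by omega)]
        norm_num
      rw [h1, ih (dwT t) hlen]
      have hc : 0 ≤ cntT t := cntT_nonneg t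
      simp only [Mof, pvRuns_true, List.foldl_cons, pvF_true]
      have : max (0 : Int) (1 + cntT t) = max (1 + cntT t) 0 := by omega
      rw [this, foldl_pvF_max]

theorem mx_eq_Mof (bs : List Bool) : mx bs 0 = Mof bs := mx_eq_Mof_aux bs.length bs le_rfl

theorem mx_true (bs : List Bool) (r : Int) : mx (true :: bs) r = mx bs (r + 1) := rfl

theorem bGo_eq (a : Int) (bs : List Bool) (r : Int) (hr : 0 ≤ r) (h : ¬(0 < a ∧ a ≤ r)) :
    bGo a bs r = (decide (0 < a) && decide (a ≤ mx bs r)) := by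
  induction bs generalizing r with
  | nil =>
    show false = (decide (0 < a) && decide (a ≤ r))
    by_cases h1 : 0 < a
    · have h2 : ¬ a ≤ r := fun hc => h ⟨h1, hc⟩
      simp [h1, h2]
    · simp [h1]
  | cons b bs ih =>
    cases b with
    | false =>
      show bGo a bs 0 = (decide (0 < a) && decide (a ≤ max r (mx bs 0)))
      rw [ih 0 le_rfl (by omega)]
      by_cases h1 : 0 < a
      · have hnr : ¬ a ≤ r := fun hc => h ⟨h1, hc⟩
        by_cases h3 : a ≤ mx bs 0
        · have h4 : a ≤ max r (mx bs 0) := le_trans h3 (le_max_right _ _)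
          simp [h1, h3, h4]
        · have h4 : ¬ a ≤ max r (mx bs 0) := by
            intro hc
            rcases le_max_iff.mp hc with h5 | h5
            · exact hnr h5
            · exact h3 h5
          simp [h1, h3, h4]
      · simp [h1]
    | true =>
      show (if r + 1 = a then true else bGo a bs (r + 1)) = _
      rw [mx_true]
      by_cases he : r + 1 = a
      · subst he
        have h0 : 0 < r + 1 := by omega
        have hm : r + 1 ≤ mx bs (r + 1) := mx_ge bs (r + 1)
        simp [h0, hm]
      · rw [if_neg he, ih (r + 1) (by omega) (by omega)]

-- ===== VERDICT (by name: the statement is the Claim_ definition above) =====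
theorem check_diagonal_right_spec : Claim_equal_check_diagonal_right := by
  intro player a _dom hPre
  have ha : 0 < a := by unfold Pre_check_diagonal_right at hPre; omega
  show check_diagonal_right player a = check_diagonal_right_alt player a
  rw [check_diagonal_right, aGo_eq_bGo, bGo_eq a _ 0 le_rfl (by omega), mx_eq_Mof]
  simp only [ha, decide_true, Bool.true_and]
  rfl
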